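-- pv_equiv track=rewrite | github.com/abhishek25dh/exp-pipeline | layout_8_step_1.py | build_min_lens
-- ===== SOURCE A (Python) =====
-- def build_min_lens(total_tokens, phrase_count):
--     min_lens = [2 for _ in range(phrase_count)]
--     min_total = sum(min_lens)
--     if total_tokens >= min_total:
--         return min_lens
--
--     deficit = min_total - total_tokens
--     # Reduce text phrases first, then image phrases.
--     order = [i for i in range(phrase_count) if i % 2 == 1] + [i for i in range(phrase_count) if i % 2 == 0]
--     i = 0
--     while deficit > 0 and i < 1000:
--         for idx in order:
--             if deficit <= 0:
--                 break
--             if min_lens[idx] > 1: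
--                 min_lens[idx] -= 1
--                 deficit -= 1
--         i += 1
--     return min_lens
-- ===== SOURCE B (Python) =====
-- def build_min_lens(total_tokens, phrase_count):
--     # A reduces each entry from 2 to at most 1, odd indices first then even,
--     # until the deficit is met; closed form in one pass.
--     n = phrase_count if phrase_count > 0 else 0
--     k = 2 * n - total_tokens          # deficit
--     if k < 0:
--         k = 0
--     if k > n:
--         k = n                         # at most one reduction per phrase
--     nodd = n // 2                     # number of odd indices reduced first
--     return [1 if (i % 2 == 1 and i // 2 < k) or (i % 2 == 0 and i // 2 < k - nodd) else 2
--             for i in range(n)]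
-- ===== Notes on version B (the rewrite author's own statement) =====
-- stated objective: faster
-- what changed: Replaces A's up-to-1000-pass retry loop that repeatedly scans the odd-then-even order list and mutates min_lens by a closed form: each entry can drop from 2 to 1 at most once, so B computes the reduction count k = clamp(2*n - total_tokens, 0, n) and builds the list in one pass, marking the first k positions of the odd-first order as 1.
import Mathlib
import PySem

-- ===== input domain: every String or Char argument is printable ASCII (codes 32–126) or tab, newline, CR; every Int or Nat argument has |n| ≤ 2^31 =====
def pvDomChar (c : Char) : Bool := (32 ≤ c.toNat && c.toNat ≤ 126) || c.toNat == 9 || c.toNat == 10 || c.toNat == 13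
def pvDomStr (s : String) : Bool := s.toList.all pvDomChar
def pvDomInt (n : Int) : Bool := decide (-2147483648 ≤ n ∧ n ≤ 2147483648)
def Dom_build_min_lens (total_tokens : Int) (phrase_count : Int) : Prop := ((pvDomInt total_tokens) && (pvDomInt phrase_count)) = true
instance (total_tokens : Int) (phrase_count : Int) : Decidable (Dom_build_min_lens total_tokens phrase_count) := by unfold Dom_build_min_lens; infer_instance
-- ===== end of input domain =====

-- B replaces A's up-to-1000-pass reduction loop by a one-pass closed form (return value only; A mutates no argument).

-- ===== PORT A =====
-- inner 'for idx in order' loop; the 'break' on deficit ≤ 0 is modeled by returning the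
-- state unchanged (exact: once deficit ≤ 0 every remaining iteration is skipped too).
-- min_lens[idx] is read with pyGetD and written with List.set idx.toNat: exact here since
-- every idx in order is nonnegative and in range.
def pvInnerFor : List Int → List Int × Int → List Int × Int
  | [], st => st
  | idx :: rest, (ml, d) =>
      if d ≤ 0 then (ml, d)
      else if PySem.List.pyGetD ml idx 0 > 1 then
        pvInnerFor rest (ml.set idx.toNat (PySem.List.pyGetD ml idx 0 - 1), d - 1)
      else pvInnerFor rest (ml, d)

-- 'while deficit > 0 and i < 1000': fuel = 1000 - i
def pvOuterWhile (order : List Int) : Nat → List Int × Int → List Int × Int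
  | 0, st => st
  | fuel + 1, (ml, d) =>
      if d > 0 then pvOuterWhile order fuel (pvInnerFor order (ml, d)) else (ml, d)

def build_min_lens (total_tokens : Int) (phrase_count : Int) : List Int :=
  let min_lens := (PySem.List.pyRange 0 phrase_count 1).map (fun _ => (2 : Int))
  let min_total := min_lens.sum
  if total_tokens ≥ min_total then min_lens
  else
    let deficit := min_total - total_tokens
    let order := ((PySem.List.pyRange 0 phrase_count 1).filter (fun i => PySem.Int.mod i 2 == 1))
              ++ ((PySem.List.pyRange 0 phrase_count 1).filter (fun i => PySem.Int.mod i 2 == 0))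
    (pvOuterWhile order 1000 (min_lens, deficit)).1

-- ===== PORT B =====
def build_min_lens_alt (total_tokens : Int) (phrase_count : Int) : List Int :=
  let n := if phrase_count > 0 then phrase_count else 0
  let k0 := 2 * n - total_tokens
  let k1 := if k0 < 0 then 0 else k0
  let k := if k1 > n then n else k1
  let nodd := PySem.Int.floordiv n 2
  (PySem.List.pyRange 0 n 1).map (fun i =>
    if (PySem.Int.mod i 2 == 1 && decide (PySem.Int.floordiv i 2 < k))
       || (PySem.Int.mod i 2 == 0 && decide (PySem.Int.floordiv i 2 < k - nodd)) then 1 else 2)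

-- ===== PRECONDITION & SPEC =====
def Spec_build_min_lens (total_tokens : Int) (phrase_count : Int) (out : List Int) : Prop := out = build_min_lens_alt total_tokens phrase_count
instance (total_tokens : Int) (phrase_count : Int) (out : List Int) : Decidable (Spec_build_min_lens total_tokens phrase_count out) := by unfold Spec_build_min_lens; infer_instance

-- ===== CLAIM (what is proved, stated in full; the proofs are below) =====
def Claim_equal_build_min_lens : Prop := ∀ (total_tokens : Int) (phrase_count : Int), Dom_build_min_lens total_tokens phrase_count → Spec_build_min_lens total_tokens phrase_count (build_min_lens total_tokens phrase_count)


-- ===== LEMMAS AND PROOFS =====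

-- F ml l: set every index of l (as toNat) to 1, left to right
def pvSetAll (ml : List Int) (l : List Int) : List Int :=
  l.foldl (fun m x => m.set x.toNat 1) ml

theorem pvSetAll_nil (ml : List Int) : pvSetAll ml [] = ml := rfl

theorem pvSetAll_cons (ml : List Int) (x : Int) (l : List Int) :
    pvSetAll ml (x :: l) = pvSetAll (ml.set x.toNat 1) l := rfl

theorem pvSetAll_length (l ml : List Int) : (pvSetAll ml l).length = ml.length := by
  induction l generalizing ml with
  | nil => rfl
  | cons x xs ih => rw [pvSetAll_cons, ih, List.length_set]

theorem pvSetAll_getElem (l ml : List Int) (j : Nat) (hj : j < ml.length) :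
    (pvSetAll ml l)[j]? = some (if ∃ x ∈ l, x.toNat = j then 1 else ml[j]) := by
  induction l generalizing ml with
  | nil => simp [pvSetAll_nil, hj]
  | cons x xs ih =>
    rw [pvSetAll_cons]
    rw [ih (ml.set x.toNat 1) (by simpa using hj)]
    by_cases hx : x.toNat = j
    · by_cases hxs : ∃ y ∈ xs, y.toNat = j
      · simp [hx, hxs]
      · simp [hx]
    · by_cases hxs : ∃ y ∈ xs, y.toNat = j
      · simp [hx, hxs]
      · simp only [hxs, if_false]
        rw [List.getElem_set_ne (by omega) (by simpa using hj)]
        have hcons : (∃ y ∈ x :: xs, y.toNat = j) ↔ False := by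
          simp only [List.mem_cons, iff_false]
          rintro ⟨y, hy | hy, hyj⟩
          · exact hx (hy ▸ hyj)
          · exact hxs ⟨y, hy, hyj⟩
        rw [if_neg hcons.mp]

-- the per-pass reduction count
def pvK (d : Int) (len : Nat) : Nat := if d ≤ 0 then 0 else min d.toNat len

theorem pvInnerFor_spec (l : List Int) (ml : List Int) (d : Int)
    (hnd : l.Nodup)
    (hl : ∀ x ∈ l, 0 ≤ x ∧ ∃ h : x.toNat < ml.length, ml[x.toNat] = 2) :
    pvInnerFor l (ml, d) = (pvSetAll ml (l.take (pvK d l.length)), d - pvK d l.length) := by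
  induction l generalizing ml d with
  | nil => simp [pvInnerFor, pvK, pvSetAll_nil]
  | cons x xs ih =>
    by_cases hd : d ≤ 0
    · simp [pvInnerFor, hd, pvK, pvSetAll_nil]
    · obtain ⟨hx0, hxlt, hx2⟩ := hl x (by simp)
      have hget : PySem.List.pyGetD ml x 0 = 2 := by
        rw [PySem.List.pyGetD_eq_getElem ml 0 hx0 (by omega)]
        exact hx2
      have hstep : pvInnerFor (x :: xs) (ml, d) =
          pvInnerFor xs (ml.set x.toNat (2 - 1), d - 1) := by
        simp [pvInnerFor, hd, hget]
      rw [hstep]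
      have hml' : ∀ y ∈ xs, 0 ≤ y ∧ ∃ h : y.toNat < (ml.set x.toNat (2-1)).length,
          (ml.set x.toNat (2-1))[y.toNat] = 2 := by
        intro y hy
        obtain ⟨hy0, hylt, hy2⟩ := hl y (by simp [hy])
        refine ⟨hy0, by simpa using hylt, ?_⟩
        have hyx : y ≠ x := by
          intro h; subst h; exact (List.nodup_cons.mp hnd).1 hy
        have : y.toNat ≠ x.toNat := by omega
        rw [List.getElem_set_ne (by omega)]
        exact hy2
      rw [ih (ml.set x.toNat (2-1)) (d-1) (List.nodup_cons.mp hnd).2 hml']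
      have hk : pvK d (x :: xs).length = pvK (d - 1) xs.length + 1 := by
        simp only [pvK, List.length_cons]
        split_ifs <;> omega
      rw [hk, Prod.mk.injEq]
      refine ⟨?_, by push_cast; ring⟩
      · show pvSetAll (ml.set x.toNat (2-1)) (xs.take (pvK (d-1) xs.length)) = _
        have : (x :: xs).take (pvK (d-1) xs.length + 1) =
            x :: xs.take (pvK (d-1) xs.length) := rfl
        rw [this, pvSetAll_cons]
        norm_num

theorem pvInnerFor_noop (l : List Int) (ml : List Int) (d : Int)
    (hl : ∀ x ∈ l, ¬ PySem.List.pyGetD ml x 0 > 1) :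
    pvInnerFor l (ml, d) = (ml, d) := by
  induction l with
  | nil => rfl
  | cons x xs ih =>
    by_cases hd : d ≤ 0
    · simp [pvInnerFor, hd]
    · have := hl x (by simp)
      simp only [pvInnerFor, if_neg hd]
      rw [if_neg this]
      exact ih (fun y hy => hl y (by simp [hy]))

theorem pvOuterWhile_stop (order : List Int) (fuel : Nat) (ml : List Int) (d : Int)
    (hd : ¬ d > 0) : pvOuterWhile order fuel (ml, d) = (ml, d) := by
  cases fuel with
  | zero => rfl
  | succ n => simp [pvOuterWhile, hd]

theorem pvOuterWhile_noop (order : List Int) (fuel : Nat) (ml : List Int) (d : Int)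
    (hl : ∀ x ∈ order, ¬ PySem.List.pyGetD ml x 0 > 1) :
    pvOuterWhile order fuel (ml, d) = (ml, d) := by
  induction fuel with
  | zero => rfl
  | succ n ih =>
    by_cases hd : d > 0
    · simp only [pvOuterWhile, if_pos hd]
      rw [pvInnerFor_noop order ml d hl]
      exact ih
    · simp [pvOuterWhile, hd]

-- odd/even index characterization at the Nat level
theorem pvOddsNat (n : Nat) :
    (List.range n).filter (fun k => k % 2 == 1) =
      (List.range (n / 2)).map (fun i => 2 * i + 1) := by
  induction n with
  | zero => rfl
  | succ m ih =>
    rw [List.range_succ, List.filter_append, ih]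
    by_cases hm : m % 2 = 1
    · have h2 : (m + 1) / 2 = m / 2 + 1 := by omega
      rw [h2, List.range_succ, List.map_append]
      simp only [List.filter_cons, List.filter_nil, List.map_cons, List.map_nil]
      have : 2 * (m / 2) + 1 = m := by omega
      simp [hm, this]
    · have h2 : (m + 1) / 2 = m / 2 := by omega
      rw [h2]
      simp [hm]

theorem pvEvensNat (n : Nat) :
    (List.range n).filter (fun k => k % 2 == 0) =
      (List.range ((n + 1) / 2)).map (fun i => 2 * i) := by
  induction n with
  | zero => rfl
  | succ m ih =>
    rw [List.range_succ, List.filter_append, ih]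
    by_cases hm : m % 2 = 0
    · have h2 : (m + 1 + 1) / 2 = (m + 1) / 2 + 1 := by omega
      rw [h2, List.range_succ, List.map_append]
      simp only [List.filter_cons, List.filter_nil, List.map_cons, List.map_nil]
      have : 2 * ((m + 1) / 2) = m := by omega
      simp [hm, this]
    · have h2 : (m + 1 + 1) / 2 = (m + 1) / 2 := by omega
      rw [h2]
      simp [hm]

-- the Int-level filters of A, as maps over Nat ranges
theorem pvOdds (pc : Int) :
    (PySem.List.pyRange 0 pc 1).filter (fun i => PySem.Int.mod i 2 == 1) =
      (List.range (pc.toNat / 2)).map (fun i => ((2 * i + 1 : Nat) : Int)) := by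
  rw [PySem.List.pyRange_one, List.filter_map]
  have h1 : (pc - 0).toNat = pc.toNat := by omega
  rw [h1]
  have h2 : ∀ k : Nat, ((fun i => PySem.Int.mod i 2 == 1) ∘ (fun k : Nat => (0 : Int) + k)) k
      = (fun k : Nat => k % 2 == 1) k := by
    intro k
    simp only [Function.comp, zero_add]
    rw [show ((2:Int)) = ((2:Nat):Int) by norm_num, PySem.Int.mod_natCast]
    rcases Nat.mod_two_eq_zero_or_one k with h | h <;> simp [h]
  rw [List.filter_congr (fun k _ => h2 k), pvOddsNat, List.map_map]
  apply List.map_congr_left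
  intro i _
  simp only [Function.comp]
  push_cast
  ring

theorem pvEvens (pc : Int) :
    (PySem.List.pyRange 0 pc 1).filter (fun i => PySem.Int.mod i 2 == 0) =
      (List.range ((pc.toNat + 1) / 2)).map (fun i => ((2 * i : Nat) : Int)) := by
  rw [PySem.List.pyRange_one, List.filter_map]
  have h1 : (pc - 0).toNat = pc.toNat := by omega
  rw [h1]
  have h2 : ∀ k : Nat, ((fun i => PySem.Int.mod i 2 == 0) ∘ (fun k : Nat => (0 : Int) + k)) k
      = (fun k : Nat => k % 2 == 0) k := by
    intro k
    simp only [Function.comp, zero_add]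
    rw [show ((2:Int)) = ((2:Nat):Int) by norm_num, PySem.Int.mod_natCast]
    rcases Nat.mod_two_eq_zero_or_one k with h | h <;> simp [h]
  rw [List.filter_congr (fun k _ => h2 k), pvEvensNat, List.map_map]
  apply List.map_congr_left
  intro i _
  simp only [Function.comp]
  push_cast
  ring

-- A's reduction order, at the Nat level: odd indices first, then even
def pvOrderN (n : Nat) : List Int :=
  (List.range (n / 2)).map (fun i => ((2 * i + 1 : Nat) : Int)) ++
  (List.range ((n + 1) / 2)).map (fun i => ((2 * i : Nat) : Int))

theorem pvOrderN_length (n : Nat) : (pvOrderN n).length = n := by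
  simp [pvOrderN]; omega

theorem pvOrderN_nodup (n : Nat) : (pvOrderN n).Nodup := by
  refine List.Nodup.append ?_ ?_ ?_
  · refine List.Nodup.map ?_ List.nodup_range
    intro a b h
    have : (2*a+1 : Nat) = 2*b+1 := by simpa using h
    omega
  · refine List.Nodup.map ?_ List.nodup_range
    intro a b h
    have : (2*a : Nat) = 2*b := by simpa using h
    omega
  · intro x hx hy
    simp only [List.mem_map, List.mem_range] at hx hy
    obtain ⟨i, _, hi⟩ := hx
    obtain ⟨j, _, hj⟩ := hy
    rw [← hi] at hj
    have : (2*j : Nat) = 2*i+1 := by exact_mod_cast hj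
    omega

theorem pvOrderN_mem (n : Nat) (x : Int) (hx : x ∈ pvOrderN n) :
    0 ≤ x ∧ x.toNat < n := by
  simp only [pvOrderN, List.mem_append, List.mem_map, List.mem_range] at hx
  rcases hx with ⟨i, hi, rfl⟩ | ⟨i, hi, rfl⟩ <;> constructor <;> simp <;> omega

theorem pvOrderN_take_mem (n K j : Nat) (_hK : K ≤ n) :
    (∃ x ∈ (pvOrderN n).take K, x.toNat = j) ↔
      (j % 2 = 1 ∧ j / 2 < min K (n / 2)) ∨
      (j % 2 = 0 ∧ j / 2 + n / 2 < K ∧ j / 2 < (n + 1) / 2) := by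
  rw [pvOrderN, List.take_append]
  simp only [List.length_map, List.length_range]
  rw [← List.map_take, ← List.map_take, List.take_range, List.take_range]
  constructor
  · rintro ⟨x, hx, rfl⟩
    simp only [List.mem_append, List.mem_map, List.mem_range] at hx
    rcases hx with ⟨i, hi, rfl⟩ | ⟨i, hi, rfl⟩
    · left; simp; omega
    · right; simp; omega
  · rintro (⟨h2, hlt⟩ | ⟨h2, hlt, hlt2⟩)
    · refine ⟨((2 * (j/2) + 1 : Nat) : Int), ?_, by simp; omega⟩
      simp only [List.mem_append, List.mem_map, List.mem_range]
      exact Or.inl ⟨j/2, by omega, rfl⟩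
    · refine ⟨((2 * (j/2) : Nat) : Int), ?_, by simp; omega⟩
      simp only [List.mem_append, List.mem_map, List.mem_range]
      exact Or.inr ⟨j/2, by omega, rfl⟩

-- A unfolded: the branch test, order and state in Nat form
theorem pvA_eq (tt pc : Int) :
    build_min_lens tt pc =
      if tt ≥ 2 * (pc.toNat : Int) then List.replicate pc.toNat 2
      else (pvOuterWhile (pvOrderN pc.toNat) 1000
              (List.replicate pc.toNat 2, 2 * (pc.toNat : Int) - tt)).1 := by
  have hml : (PySem.List.pyRange 0 pc 1).map (fun _ => (2 : Int)) =
      List.replicate pc.toNat 2 := by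
    rw [PySem.List.pyRange_one, List.map_map]
    have h1 : (pc - 0).toNat = pc.toNat := by omega
    rw [h1]
    have : ((fun _ => (2:Int)) ∘ fun k : Nat => (0:Int) + k) = fun _ => (2:Int) := rfl
    rw [this, List.map_const', List.length_range]
  have hsum : (List.replicate pc.toNat (2:Int)).sum = 2 * (pc.toNat : Int) := by
    simp [List.sum_replicate]
    ring
  simp only [build_min_lens, hml, hsum]
  congr 1
  rw [pvOdds, pvEvens, pvOrderN]

theorem pvInner_result (n : Nat) (d : Int) (hd : 0 < d) :
    pvInnerFor (pvOrderN n) (List.replicate n 2, d) =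
      (pvSetAll (List.replicate n 2) ((pvOrderN n).take (min d.toNat n)),
       d - (min d.toNat n : Nat)) := by
  rw [pvInnerFor_spec (pvOrderN n) (List.replicate n 2) d (pvOrderN_nodup n)
      (fun x hx => by
        obtain ⟨h0, hlt⟩ := pvOrderN_mem n x hx
        exact ⟨h0, by simpa using hlt, by simp⟩)]
  rw [pvOrderN_length]
  have : pvK d n = min d.toNat n := by simp [pvK]; omega
  rw [this]

theorem pvSetAll_take_le_one (n K : Nat) (_hK : K ≤ n) (x : Int)
    (hx : x ∈ (pvOrderN n).take K) :
    (pvSetAll (List.replicate n (2:Int)) ((pvOrderN n).take K))[x.toNat]? = some 1 := by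
  have hmem := pvOrderN_mem n x (List.mem_of_mem_take hx)
  rw [pvSetAll_getElem _ _ x.toNat (by simpa using hmem.2)]
  rw [if_pos ⟨x, hx, rfl⟩]

-- A's value in the reducing branch, all fuel spent or loop exited
theorem pvA_hard (n : Nat) (d : Int) (hd : 0 < d) :
    (pvOuterWhile (pvOrderN n) 1000 (List.replicate n 2, d)).1 =
      pvSetAll (List.replicate n 2) ((pvOrderN n).take (min d.toNat n)) := by
  have h1000 : (1000 : Nat) = 999 + 1 := rfl
  rw [h1000]
  show (pvOuterWhile (pvOrderN n) (999+1) (List.replicate n 2, d)).1 = _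
  rw [pvOuterWhile]
  rw [if_pos hd, pvInner_result n d hd]
  set K := min d.toNat n with hKdef
  set ml1 := pvSetAll (List.replicate n (2:Int)) ((pvOrderN n).take K) with hml1
  by_cases hrem : d - (K : Nat) > 0
  · -- deficit remains: every order entry is already 1, later passes are no-ops
    have hKn : K = n := by omega
    have hall : ∀ x ∈ pvOrderN n, ¬ PySem.List.pyGetD ml1 x 0 > 1 := by
      intro x hx
      have hxt : x ∈ (pvOrderN n).take K := by
        rw [List.take_of_length_le (by rw [pvOrderN_length]; omega)]
        exact hx
      obtain ⟨h0, hlt⟩ := pvOrderN_mem n x hx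
      have hlen : x < (ml1.length : Int) := by
        rw [hml1, pvSetAll_length]
        simp only [List.length_replicate]
        omega
      rw [PySem.List.pyGetD_eq_getElem ml1 0 h0 hlen]
      have := pvSetAll_take_le_one n K (by omega) x hxt
      have hgl : x.toNat < ml1.length := by
        rw [hml1, pvSetAll_length]; simpa using hlt
      rw [List.getElem?_eq_getElem hgl] at this
      simp only [Option.some.injEq] at this
      rw [this]
      norm_num
    rw [pvOuterWhile_noop _ _ _ _ hall]
  · rw [pvOuterWhile_stop _ _ _ _ hrem]

-- B's element function, in Nat form
theorem pvB_eq (tt pc : Int) (j : Nat) (hj : j < pc.toNat) :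
    (build_min_lens_alt tt pc)[j]? =
      some (if (j % 2 = 1 ∧ (j / 2 : Int) < min (2 * (pc.toNat:Int) - tt) pc.toNat)
              ∨ (j % 2 = 0 ∧ (j / 2 : Int) < min (2 * (pc.toNat:Int) - tt) pc.toNat - pc.toNat / 2)
            then 1 else 2) := by
  have hpc : (0:Int) < pc := by omega
  have hn : (if pc > 0 then pc else 0) = ((pc.toNat : Nat) : Int) := by
    rw [if_pos hpc]; omega
  simp only [build_min_lens_alt, hn]
  rw [PySem.List.getElem?_map_pyRange_zero _ pc.toNat j hj]
  congr 1
  simp only [Bool.or_eq_true, Bool.and_eq_true, beq_iff_eq, decide_eq_true_eq,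
    PySem.Int.mod_eq_emod_of_pos (by norm_num : (0:Int) < 2),
    PySem.Int.floordiv_eq_ediv_of_pos (by norm_num : (0:Int) < 2)]
  refine if_congr ?_ rfl rfl
  split_ifs <;> omega

theorem pvB_length (tt pc : Int) : (build_min_lens_alt tt pc).length = pc.toNat := by
  simp only [build_min_lens_alt, List.length_map, PySem.List.length_pyRange_one]
  split_ifs <;> omega

-- ===== VERDICT (by name: the statement is the Claim_ definition above) =====
theorem build_min_lens_spec : Claim_equal_build_min_lens := by
  intro tt pc _
  show build_min_lens tt pc = build_min_lens_alt tt pc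
  rw [pvA_eq]
  by_cases hge : tt ≥ 2 * (pc.toNat : Int)
  · rw [if_pos hge]
    refine List.ext_getElem? ?_
    intro j
    by_cases hj : j < pc.toNat
    · rw [pvB_eq tt pc j hj]
      rw [List.getElem?_eq_getElem (by simpa using hj)]
      simp only [List.getElem_replicate]
      congr 1
      rw [if_neg (by omega)]
    · rw [List.getElem?_eq_none (by simpa using Nat.le_of_not_lt hj),
          List.getElem?_eq_none (by rw [pvB_length]; omega)]
  · rw [if_neg hge]
    rw [pvA_hard pc.toNat (2 * (pc.toNat : Int) - tt) (by omega)]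
    refine List.ext_getElem? ?_
    intro j
    by_cases hj : j < pc.toNat
    · rw [pvB_eq tt pc j hj]
      rw [pvSetAll_getElem _ _ j (by simpa using hj)]
      simp only [List.getElem_replicate]
      simp only [pvOrderN_take_mem pc.toNat (min (2 * (pc.toNat : Int) - tt).toNat pc.toNat) j
        (by omega)]
      exact congrArg some (if_congr (by omega) rfl rfl)
    · rw [List.getElem?_eq_none (by rw [pvSetAll_length]; simpa using Nat.le_of_not_lt hj),
          List.getElem?_eq_none (by rw [pvB_length]; omega)]
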